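-- pv_equiv track=rewrite | github.com/yoko8ma/ABC | abc112_c.py | func
-- ===== SOURCE A (Python) =====
-- def func(n, a):
--   b = None
--   for x in a:
--     if x[2] != 0:
--       b = x
--
--   for i in range(101):
--     for j in range(101):
--         h = b[2] + abs(b[0]-i) + abs(b[1]-j)
--         flag = True
--
--         for m in a:
--           if m[2] != max(h - abs(m[0]-i)- abs(m[1]-j), 0):
--             flag = False
--             break
--         if flag:
--           return i, j, h
-- ===== SOURCE B (Python) =====
-- def func(n, a):
--     # choose any nonzero observation; for every consistent candidate the height
--     # it implies is the same, so the first one works as well as any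
--     b = next(x for x in a if x[2] != 0)
--     cands = [(i, j) for i in range(101) for j in range(101)]
--     for m in a:
--         cands = [(i, j) for (i, j) in cands
--                  if m[2] == max(b[2] + abs(b[0] - i) + abs(b[1] - j)
--                                 - abs(m[0] - i) - abs(m[1] - j), 0)]
--         if not cands:
--             return None
--     i, j = cands[0]
--     return i, j, b[2] + abs(b[0] - i) + abs(b[1] - j)
-- ===== Notes on version B (the rewrite author's own statement) =====
-- stated objective: alternative
-- what changed: B replaces A's per-candidate verification over all observations (with a last-nonzero reference) by one order-preserving filtering pass per observation over a shrinking candidate list, using the first nonzero observation as the reference height (provably equivalent).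
-- outside the precondition, e.g. on func(1, [(0, 0, 0)]): A raises TypeError, B raises StopIteration
import Mathlib
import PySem

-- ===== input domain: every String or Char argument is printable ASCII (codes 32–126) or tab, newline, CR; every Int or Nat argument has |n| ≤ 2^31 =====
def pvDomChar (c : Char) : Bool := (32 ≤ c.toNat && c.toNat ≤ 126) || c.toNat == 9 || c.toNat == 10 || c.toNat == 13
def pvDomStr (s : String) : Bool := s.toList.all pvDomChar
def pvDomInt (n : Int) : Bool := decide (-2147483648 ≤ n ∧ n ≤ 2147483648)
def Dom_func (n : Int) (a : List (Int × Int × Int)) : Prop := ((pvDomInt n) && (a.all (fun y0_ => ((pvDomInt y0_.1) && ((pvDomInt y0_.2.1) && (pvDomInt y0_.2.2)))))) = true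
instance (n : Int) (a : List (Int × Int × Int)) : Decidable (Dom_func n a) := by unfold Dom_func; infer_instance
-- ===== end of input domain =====

-- B replaces A's per-candidate verification scan with one filtering pass per observation
-- over a shrinking candidate list (and picks the first nonzero observation instead of the
-- last, which provably yields the same implied height); objective: alternative.

-- ===== PORT A =====
-- first loop of A: b = last x in a with x[2] != 0 (None if there is none)
def pvLastNZ : List (Int × Int × Int) → Option (Int × Int × Int) → Option (Int × Int × Int)
  | [], b => b
  | x :: xs, b => pvLastNZ xs (if x.2.2 ≠ 0 then some x else b)

-- inner 'for m in a' loop with its break: flag stays True iff every m agrees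
def pvCheckA (i j h : Int) : List (Int × Int × Int) → Bool
  | [] => true
  | m :: rest =>
      if m.2.2 ≠ max (h - |m.1 - i| - |m.2.1 - j|) 0 then false
      else pvCheckA i j h rest

-- 'for j in range(101)' with early return
def pvLoopJ (a : List (Int × Int × Int)) (b : Int × Int × Int) (i : Int) :
    List Int → Option (Int × Int × Int)
  | [] => none
  | j :: js =>
      let h := b.2.2 + |b.1 - i| + |b.2.1 - j|
      if pvCheckA i j h a then some (i, j, h) else pvLoopJ a b i js

-- 'for i in range(101)' with early return
def pvLoopI (a : List (Int × Int × Int)) (b : Int × Int × Int) :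
    List Int → Option (Int × Int × Int)
  | [] => none
  | i :: is_ =>
      match pvLoopJ a b i (PySem.List.pyRange 0 101 1) with
      | some r => some r
      | none => pvLoopI a b is_

def func (n : Int) (a : List (Int × Int × Int)) : Option (Int × Int × Int) :=
  match pvLastNZ a none with
  | none => none   -- Python raises TypeError here (b is None); excluded by Pre_func
  | some b => pvLoopI a b (PySem.List.pyRange 0 101 1)

-- ===== PORT B =====
-- height implied by observation b at center (i, j)
def pvH (b : Int × Int × Int) (i j : Int) : Int := b.2.2 + |b.1 - i| + |b.2.1 - j|

-- the comprehension filter condition for observation m (with reference observation b)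
def pvCondB (b m : Int × Int × Int) (ij : Int × Int) : Bool :=
  m.2.2 == max (pvH b ij.1 ij.2 - |m.1 - ij.1| - |m.2.1 - ij.2|) 0

-- [(i, j) for i in range(101) for j in range(101)]
def pvGrid : List (Int × Int) :=
  (PySem.List.pyRange 0 101 1).flatMap
    (fun i => (PySem.List.pyRange 0 101 1).map (fun j => (i, j)))

-- 'for m in a' filtering loop with the early 'return None' on an empty candidate list
def pvLoopB (b : Int × Int × Int) :
    List (Int × Int × Int) → List (Int × Int) → Option (List (Int × Int))
  | [], cands => some cands
  | m :: rest, cands =>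
      let c := cands.filter (pvCondB b m)
      if c = [] then none else pvLoopB b rest c

def func_alt (n : Int) (a : List (Int × Int × Int)) : Option (Int × Int × Int) :=
  match a.find? (fun x => x.2.2 != 0) with
  | none => none   -- Python: next(...) raises StopIteration; excluded by Pre_func
  | some b =>
      match pvLoopB b a pvGrid with
      | none => none
      | some cands =>
          match cands.head? with
          | none => none   -- unreachable totalization guard for cands[0]
          | some (i, j) => some (i, j, pvH b i j)

-- ===== PRECONDITION & SPEC =====
-- Pre_ excludes inputs with no nonzero altitude observation, on which A raises TypeError
-- (b stays None) and B raises StopIteration.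
def Pre_func (n : Int) (a : List (Int × Int × Int)) : Prop := ∃ x ∈ a, x.2.2 ≠ 0
instance (n : Int) (a : List (Int × Int × Int)) : Decidable (Pre_func n a) := by unfold Pre_func; infer_instance

def pvWitness_func : Int × (List (Int × Int × Int)) := (1, [(2, 3, 5)])

def Spec_func (n : Int) (a : List (Int × Int × Int)) (out : Option (Int × Int × Int)) : Prop := out = func_alt n a
instance (n : Int) (a : List (Int × Int × Int)) (out : Option (Int × Int × Int)) : Decidable (Spec_func n a out) := by unfold Spec_func; infer_instance

-- ===== CLAIM (what is proved, stated in full; the proofs are below) =====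
def Claim_equal_func : Prop := ∀ (n : Int) (a : List (Int × Int × Int)), Dom_func n a → Pre_func n a → Spec_func n a (func n a)

-- ===== LEMMAS AND PROOFS =====

-- the combined per-candidate predicate both searches decide
def pvPA (a : List (Int × Int × Int)) (b : Int × Int × Int) (ij : Int × Int) : Bool :=
  a.all (fun m => pvCondB b m ij)

theorem pvCheckA_eq (a : List (Int × Int × Int)) (b : Int × Int × Int) (i j : Int) :
    pvCheckA i j (pvH b i j) a = pvPA a b (i, j) := by
  induction a with
  | nil => rfl
  | cons m rest ih =>
      simp only [pvCheckA, pvPA, List.all_cons, pvCondB, pvH] at *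
      by_cases h : m.2.2 = max (b.2.2 + |b.1 - i| + |b.2.1 - j| - |m.1 - i| - |m.2.1 - j|) 0 <;>
        simp [h, ih]

-- a candidate consistent with all observations gives every nonzero observation the same height
theorem pvH_eq (a : List (Int × Int × Int)) (b b' : Int × Int × Int) (ij : Int × Int)
    (hb' : b' ∈ a) (hnz : b'.2.2 ≠ 0) (hall : pvPA a b ij = true) :
    pvH b' ij.1 ij.2 = pvH b ij.1 ij.2 := by
  have hc : pvCondB b b' ij = true := by
    simp only [pvPA, List.all_eq_true] at hall
    exact hall b' hb'
  simp only [pvCondB, beq_iff_eq] at hc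
  simp only [pvH] at *
  generalize |b'.1 - ij.1| = p at *
  generalize |b'.2.1 - ij.2| = q at *
  omega

theorem pvPA_swap (a : List (Int × Int × Int)) (b b' : Int × Int × Int)
    (hb : b ∈ a) (hnzb : b.2.2 ≠ 0) (hb' : b' ∈ a) (hnzb' : b'.2.2 ≠ 0) (ij : Int × Int) :
    pvPA a b ij = pvPA a b' ij := by
  have key : ∀ c c' : Int × Int × Int, c ∈ a → c.2.2 ≠ 0 → c' ∈ a → c'.2.2 ≠ 0 →
      pvPA a c ij = true → pvPA a c' ij = true := by
    intro c c' hc hnzc hc' hnzc' hall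
    have hh : pvH c' ij.1 ij.2 = pvH c ij.1 ij.2 := pvH_eq a c c' ij hc' hnzc' hall
    simp only [pvPA, List.all_eq_true] at hall ⊢
    intro m hm
    have := hall m hm
    simpa only [pvCondB, hh] using this
  by_cases h1 : pvPA a b ij = true
  · rw [h1, (key b b' hb hnzb hb' hnzb' h1).symm]
  · by_cases h2 : pvPA a b' ij = true
    · exact absurd (key b' b hb' hnzb' hb hnzb h2) h1
    · simp only [Bool.not_eq_true] at h1 h2; rw [h1, h2]

theorem pvLoopJ_eq (a : List (Int × Int × Int)) (b : Int × Int × Int) (i : Int)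
    (js : List Int) :
    pvLoopJ a b i js =
      ((js.map (fun j => (i, j))).find? (pvPA a b)).map
        (fun ij => (ij.1, ij.2, pvH b ij.1 ij.2)) := by
  induction js with
  | nil => rfl
  | cons j js ih =>
      simp only [pvLoopJ, List.map_cons, List.find?_cons]
      have hc : pvCheckA i j (b.2.2 + |b.1 - i| + |b.2.1 - j|) a = pvPA a b (i, j) := by
        simpa only [pvH] using pvCheckA_eq a b i j
      by_cases h : pvPA a b (i, j) = true
      · rw [hc]; simp [h, pvH]
      · simp only [Bool.not_eq_true] at h
        rw [hc]; simp [h, ih]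

theorem pvLoopI_eq (a : List (Int × Int × Int)) (b : Int × Int × Int)
    (is_ : List Int) :
    pvLoopI a b is_ =
      ((is_.flatMap (fun i => (PySem.List.pyRange 0 101 1).map (fun j => (i, j)))).find?
          (pvPA a b)).map (fun ij => (ij.1, ij.2, pvH b ij.1 ij.2)) := by
  induction is_ with
  | nil => rfl
  | cons i is_ ih =>
      simp only [pvLoopI, List.flatMap_cons, List.find?_append, pvLoopJ_eq a b i]
      cases hf : ((PySem.List.pyRange 0 101 1).map (fun j => (i, j))).find? (pvPA a b) with
      | some r => simp
      | none => simp [ih]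

theorem pvHead_filter (l : List (Int × Int)) (p : Int × Int → Bool) :
    (l.filter p).head? = l.find? p := by
  induction l with
  | nil => rfl
  | cons x xs ih => by_cases h : p x <;> simp [h, ih]

theorem pvLoopB_eq (b : Int × Int × Int) (ms : List (Int × Int × Int)) :
    ∀ cands : List (Int × Int),
      (match pvLoopB b ms cands with
        | none => none
        | some c => c.head?) =
      (cands.filter (fun ij => ms.all (fun m => pvCondB b m ij))).head? := by
  induction ms with
  | nil => intro cands; simp [pvLoopB]
  | cons m rest ih =>
      intro cands
      simp only [pvLoopB]
      by_cases hemp : cands.filter (pvCondB b m) = []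
      · have hnone : ∀ ij ∈ cands, ¬ pvCondB b m ij = true := by
          intro ij hij hcond
          have : ij ∈ cands.filter (pvCondB b m) := List.mem_filter.mpr ⟨hij, hcond⟩
          simp [hemp] at this
        have hz : cands.filter (fun ij => (m :: rest).all (fun m' => pvCondB b m' ij)) = [] := by
          rw [List.filter_eq_nil_iff]
          intro ij hij
          simp only [List.all_cons, Bool.and_eq_true, not_and]
          intro hcond
          exact absurd hcond (hnone ij hij)
        rw [if_pos hemp, hz]
        rfl
      · rw [if_neg hemp, ih]
        rw [List.filter_filter]
        congr 1
        apply List.filter_congr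
        intro ij _
        simp [List.all_cons, Bool.and_comm]

theorem pvLastNZ_mem (a : List (Int × Int × Int)) :
    ∀ acc b, pvLastNZ a acc = some b → (b ∈ a ∧ b.2.2 ≠ 0) ∨ acc = some b := by
  induction a with
  | nil => intro acc b h; right; exact h
  | cons x xs ih =>
      intro acc b h
      simp only [pvLastNZ] at h
      rcases ih _ b h with ⟨hm, hnz⟩ | hacc
      · exact Or.inl ⟨List.mem_cons_of_mem x hm, hnz⟩
      · by_cases hx : x.2.2 ≠ 0
        · rw [if_pos hx] at hacc
          left
          obtain rfl : x = b := by injection hacc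
          exact ⟨List.mem_cons_self, hx⟩
        · rw [if_neg hx] at hacc; right; exact hacc

theorem pvLastNZ_some_acc (a : List (Int × Int × Int)) :
    ∀ acc : Option (Int × Int × Int), acc.isSome → (pvLastNZ a acc).isSome := by
  induction a with
  | nil => intro acc h; exact h
  | cons x xs ih =>
      intro acc h
      simp only [pvLastNZ]
      by_cases hx : x.2.2 ≠ 0
      · exact ih _ (by simp [hx])
      · rw [if_neg hx]; exact ih _ h

theorem pvLastNZ_some (a : List (Int × Int × Int)) (hex : ∃ x ∈ a, x.2.2 ≠ 0) :
    ∀ acc, (pvLastNZ a acc).isSome := by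
  induction a with
  | nil => simp at hex
  | cons x xs ih =>
      intro acc
      simp only [pvLastNZ]
      by_cases hx : x.2.2 ≠ 0
      · exact pvLastNZ_some_acc xs _ (by simp [hx])
      · rw [if_neg hx]
        rcases hex with ⟨y, hy, hnzy⟩
        rcases List.mem_cons.mp hy with rfl | hyxs
        · exact absurd hnzy hx
        · exact ih ⟨y, hyxs, hnzy⟩ acc

-- ===== VERDICT (by name: the statement is the Claim_ definition above) =====
theorem func_spec : Claim_equal_func := by
  intro n a _ hpre
  unfold Spec_func func func_alt
  -- both reference observations exist
  have hbA : (pvLastNZ a none).isSome := pvLastNZ_some a hpre none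
  obtain ⟨b2, hb2⟩ := Option.isSome_iff_exists.mp hbA
  have hbB : (a.find? (fun x => x.2.2 != 0)).isSome := by
    rw [List.find?_isSome]
    rcases hpre with ⟨x, hx, hnz⟩
    exact ⟨x, hx, by simpa using hnz⟩
  obtain ⟨b1, hb1⟩ := Option.isSome_iff_exists.mp hbB
  have hb2mem : b2 ∈ a ∧ b2.2.2 ≠ 0 := by
    rcases pvLastNZ_mem a none b2 hb2 with h | h
    · exact h
    · simp at h
  have hb1mem : b1 ∈ a := List.mem_of_find?_eq_some hb1
  have hb1nz : b1.2.2 ≠ 0 := by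
    have := List.find?_some hb1; simpa using this
  have hAeq :
      (match pvLastNZ a none with
        | none => (none : Option (Int × Int × Int))
        | some b => pvLoopI a b (PySem.List.pyRange 0 101 1)) =
      pvLoopI a b2 (PySem.List.pyRange 0 101 1) := by rw [hb2]
  have hBeq :
      (match a.find? (fun x => x.2.2 != 0) with
        | none => (none : Option (Int × Int × Int))
        | some b =>
            match pvLoopB b a pvGrid with
            | none => none
            | some cands =>
                match cands.head? with
                | none => none
                | some (i, j) => some (i, j, pvH b i j)) =
      (match pvLoopB b1 a pvGrid with
        | none => (none : Option (Int × Int × Int))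
        | some cands =>
            match cands.head? with
            | none => none
            | some (i, j) => some (i, j, pvH b1 i j)) := by rw [hb1]
  rw [hAeq, hBeq]
  -- rewrite the A side into a find? over the grid
  rw [pvLoopI_eq a b2 (PySem.List.pyRange 0 101 1)]
  have hg : (PySem.List.pyRange 0 101 1).flatMap
      (fun i => (PySem.List.pyRange 0 101 1).map (fun j => (i, j))) = pvGrid := rfl
  rw [hg]
  -- rewrite the B side into head? of the filtered grid
  have hB :
      (match pvLoopB b1 a pvGrid with
        | none => (none : Option (Int × Int × Int))
        | some cands =>
            match cands.head? with
            | none => none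
            | some (i, j) => some (i, j, pvH b1 i j)) =
      ((pvGrid.find? (pvPA a b1)).map (fun ij => (ij.1, ij.2, pvH b1 ij.1 ij.2))) := by
    have h1 := pvLoopB_eq b1 a pvGrid
    rw [← pvHead_filter pvGrid (pvPA a b1)]
    unfold pvPA
    rw [← h1]
    cases pvLoopB b1 a pvGrid with
    | none => rfl
    | some c =>
        cases c with
        | nil => rfl
        | cons x xs => cases x; rfl
  rw [hB]
  -- the two predicates coincide, courtesy of pvPA_swap
  have hpred : pvPA a b2 = pvPA a b1 := by
    funext ij
    exact pvPA_swap a b2 b1 hb2mem.1 hb2mem.2 hb1mem hb1nz ij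
  rw [hpred]
  -- and on the found candidate the two heights coincide
  cases hf : pvGrid.find? (pvPA a b1) with
  | none => rfl
  | some r =>
      have hr : pvPA a b1 r = true := List.find?_some hf
      have := pvH_eq a b1 b2 r hb2mem.1 hb2mem.2 hr
      simp [this]
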